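-- pv_equiv track=rewrite | github.com/dylanwenzlau/ml-scripts | meme_text_gen_convnet/util.py | map_char_to_int
-- ===== SOURCE A (Python) =====
-- import operator
--
-- def map_char_to_int(texts):
--     char_counts = {}
--     for text in texts:
--         for char in text:
--             char_counts[char] = char_counts[char] + 1 if char in char_counts else 1
--     char_counts_sorted = sorted(char_counts.items(), key=operator.itemgetter(1), reverse=True)
--     char_to_int = {}
--     for i, row in enumerate(char_counts_sorted):
--         char_to_int[row[0]] = i + 1
--     return char_to_int
-- ===== SOURCE B (Python) =====
-- def map_char_to_int(texts):
--     char_counts = {}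
--     for text in texts:
--         for char in text:
--             char_counts[char] = char_counts[char] + 1 if char in char_counts else 1
--     # bucket/counting sort: group chars by frequency, preserving first-seen order per bucket
--     buckets = {}
--     for char, count in char_counts.items():
--         buckets[count] = buckets.get(count, []) + [char]
--     char_to_int = {}
--     rank = 0
--     for count in sorted(buckets, reverse=True):
--         for char in buckets[count]:
--             rank = rank + 1
--             char_to_int[char] = rank
--     return char_to_int
-- ===== Notes on version B (the rewrite author's own statement) =====
-- stated objective: alternative
-- what changed: Replaces the general comparison sort over (char,count) pairs by a bucket/counting sort: chars are grouped into a frequency->chars dict in first-seen order and ranks are assigned by walking the distinct frequencies in descending order.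
import Mathlib
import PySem

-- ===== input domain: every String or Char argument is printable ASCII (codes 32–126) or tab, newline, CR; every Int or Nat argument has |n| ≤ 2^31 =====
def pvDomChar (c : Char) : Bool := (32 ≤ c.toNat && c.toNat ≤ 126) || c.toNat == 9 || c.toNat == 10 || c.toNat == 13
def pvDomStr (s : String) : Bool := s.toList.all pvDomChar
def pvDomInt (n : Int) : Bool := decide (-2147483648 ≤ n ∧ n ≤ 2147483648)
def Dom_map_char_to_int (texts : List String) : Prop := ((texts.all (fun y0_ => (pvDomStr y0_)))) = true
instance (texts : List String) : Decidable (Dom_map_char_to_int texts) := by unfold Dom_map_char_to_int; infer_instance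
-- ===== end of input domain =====

-- B replaces the general comparison sort over (char,count) pairs by a bucket/counting
-- sort keyed on frequency (alternative decomposition, same observable result).


-- ===== PORT A =====
-- 'for char in text' iterates the 1-character substrings of text, modelled exactly as
-- text.toList.map String.singleton.
def map_char_to_int (texts : List String) : List (String × Int) :=
  let char_counts : PySem.Dict String Int :=
    texts.foldl (fun d text =>
      (text.toList.map (fun c => String.singleton c)).foldl
        (fun d ch => d.insert ch (if d.contains ch then d.getD ch 0 + 1 else 1)) d)
      PySem.Dict.empty
  let char_counts_sorted := PySem.List.sorted char_counts.items (fun row => row.2) true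
  let char_to_int : PySem.Dict String Int :=
    (PySem.List.enumerate char_counts_sorted 0).foldl
      (fun d ir => d.insert ir.2.1 (ir.1 + 1)) PySem.Dict.empty
  char_to_int.items

-- ===== PORT B =====
def map_char_to_int_alt (texts : List String) : List (String × Int) :=
  let char_counts : PySem.Dict String Int :=
    texts.foldl (fun d text =>
      (text.toList.map (fun c => String.singleton c)).foldl
        (fun d ch => d.insert ch (if d.contains ch then d.getD ch 0 + 1 else 1)) d)
      PySem.Dict.empty
  let buckets : PySem.Dict Int (List String) :=
    char_counts.items.foldl (fun d p => d.modify p.2 [] (fun cur => cur ++ [p.1]))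
      PySem.Dict.empty
  let res :=
    (PySem.List.sorted buckets.keys (fun v => v) true).foldl
      (fun (acc : PySem.Dict String Int × Int) v =>
        (buckets.getD v []).foldl
          (fun (acc2 : PySem.Dict String Int × Int) ch =>
            (acc2.1.insert ch (acc2.2 + 1), acc2.2 + 1)) acc)
      (PySem.Dict.empty, 0)
  res.1.items

-- ===== PRECONDITION & SPEC =====
def Spec_map_char_to_int (texts : List String) (out : List (String × Int)) : Prop := out = map_char_to_int_alt texts
instance (texts : List String) (out : List (String × Int)) : Decidable (Spec_map_char_to_int texts out) := by unfold Spec_map_char_to_int; infer_instance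

-- ===== CLAIM (what is proved, stated in full; the proofs are below) =====
def Claim_equal_map_char_to_int : Prop := ∀ (texts : List String), Dom_map_char_to_int texts → Spec_map_char_to_int texts (map_char_to_int texts)

-- ===== LEMMAS AND PROOFS =====

-- the flat character stream of the input (each char as a 1-char string)
def pvChars (texts : List String) : List String :=
  texts.flatMap (fun t => t.toList.map (fun c => String.singleton c))

-- the frequency group of v : chars of l (as (char,count) pairs) whose count is v
def pvG (l : List (String × Int)) (v : Int) : List (String × Int) :=
  l.filter (fun p => p.2 == v)

lemma pv_foldl_flatMap {α β γ : Type} (f : β → List α) (g : γ → α → γ) :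
    ∀ (l : List β) (i : γ), (l.flatMap f).foldl g i = l.foldl (fun a x => (f x).foldl g a) i := by
  intro l
  induction l with
  | nil => intro i; simp
  | cons b t ih => intro i; simp [List.flatMap_cons, List.foldl_append, ih]

lemma pv_counts_eq (cs : List String) :
    cs.foldl (fun d ch => d.insert ch (if d.contains ch then d.getD ch 0 + 1 else 1))
      PySem.Dict.empty = PySem.Dict.counter cs := by
  have h1 : cs.foldl (fun (d : PySem.Dict String Int) ch =>
        d.insert ch (if d.contains ch then d.getD ch 0 + 1 else 1)) PySem.Dict.empty
      = cs.foldl (fun (d : PySem.Dict String Int) x => d.insert x (d.getD x 0 + 1)) PySem.Dict.empty := by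
    apply PySem.List.foldl_congr_mem
    intro acc x _
    cases hc : acc.contains x with
    | true => simp
    | false => simp [PySem.Dict.getD_of_not_contains _ _ hc]
  rw [h1]
  exact PySem.Dict.foldl_insert_getD_add_one_eq_counter cs

lemma pv_nested_count (texts : List String) :
    texts.foldl (fun d text =>
      (text.toList.map (fun c => String.singleton c)).foldl
        (fun d ch => d.insert ch (if d.contains ch then d.getD ch 0 + 1 else 1)) d)
      PySem.Dict.empty = PySem.Dict.counter (pvChars texts) := by
  rw [← pv_counts_eq (pvChars texts)]
  rw [pvChars, pv_foldl_flatMap]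

lemma pv_mem_pvG {l : List (String × Int)} {v : Int} {p : String × Int}
    (h : p ∈ pvG l v) : p.2 = v := by
  simp only [pvG, List.mem_filter, beq_iff_eq] at h
  exact h.2

lemma pv_pvG_append (l : List (String × Int)) (x : String × Int) (v : Int) :
    pvG (l ++ [x]) v = pvG l v ++ (if x.2 = v then [x] else []) := by
  simp only [pvG, List.filter_append, List.filter_cons, List.filter_nil]
  split_ifs with h <;> simp_all

lemma pv_flatMap_congr {α β : Type} {l : List α} {f g : α → List β}
    (h : ∀ a ∈ l, f a = g a) : l.flatMap f = l.flatMap g := by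
  induction l with
  | nil => rfl
  | cons a t ih =>
    simp only [List.flatMap_cons]
    rw [h a (by simp), ih (fun a ha => h a (by simp [ha]))]

lemma pv_insertBy_all_true {α : Type} (before : α → α → Bool) (x : α) (L : List α)
    (h : ∀ y ∈ L, before x y = true) : PySem.List.insertBy before x L = x :: L := by
  cases L with
  | nil => simp [PySem.List.insertBy]
  | cons y ys => simp [PySem.List.insertBy, h y (by simp)]

lemma pv_insertBy_all_false_append {α : Type} (before : α → α → Bool) (x : α) :
    ∀ (l₁ l₂ : List α), (∀ y ∈ l₁, before x y = false) →
      PySem.List.insertBy before x (l₁ ++ l₂) = l₁ ++ PySem.List.insertBy before x l₂ := by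
  intro l₁
  induction l₁ with
  | nil => intro l₂ _; simp
  | cons a t ih =>
    intro l₂ h
    simp only [List.cons_append, PySem.List.insertBy, h a (by simp)]
    simp [ih l₂ (fun y hy => h y (by simp [hy]))]

-- inserting x into a bucket-structured list: it lands at the end of its own bucket
lemma pv_insert_group (x : String × Int) (l : List (String × Int)) :
    ∀ (ks : List Int), ks.Pairwise (· > ·) → (x.2 ∉ ks → pvG l x.2 = []) →
      PySem.List.insertBy (fun a b => decide (b.2 < a.2)) x (ks.flatMap (pvG l))
        = if x.2 ∈ ks then ks.flatMap (pvG (l ++ [x]))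
          else (ks.takeWhile (fun v => decide (x.2 < v)) ++
                x.2 :: ks.dropWhile (fun v => decide (x.2 < v))).flatMap (pvG (l ++ [x])) := by
  intro ks
  induction ks with
  | nil =>
    intro _ h2
    simp [PySem.List.insertBy, pv_pvG_append, h2 (by simp)]
  | cons v ks ih =>
    intro hpw h2
    rcases lt_trichotomy x.2 v with hlt | heq | hgt
    · -- x.2 < v : skip the v-bucket
      have hne : x.2 ≠ v := ne_of_lt hlt
      have h2' : x.2 ∉ ks → pvG l x.2 = [] := fun hn => h2 (by simp [hne, hn])
      have hfalse : ∀ y ∈ pvG l v, (fun a b => decide ((b : String × Int).2 < a.2)) x y = false := by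
        intro y hy
        have := pv_mem_pvG hy
        simp [this, not_lt_of_gt hlt]
      rw [List.flatMap_cons, pv_insertBy_all_false_append _ _ _ _ hfalse,
          ih hpw.of_cons h2']
      have htk : (v :: ks).takeWhile (fun w => decide (x.2 < w)) =
          v :: ks.takeWhile (fun w => decide (x.2 < w)) := by
        simp [hlt]
      have hdk : (v :: ks).dropWhile (fun w => decide (x.2 < w)) =
          ks.dropWhile (fun w => decide (x.2 < w)) := by
        simp [hlt]
      by_cases hx : x.2 ∈ ks
      · simp only [if_true, List.mem_cons, hne, false_or, hx]
        rw [List.flatMap_cons, pv_pvG_append l x v]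
        simp [hne]
      · have hxn : x.2 ∉ v :: ks := by simp [hne, hx]
        simp only [hx, if_false, hxn, htk, hdk]
        rw [List.cons_append, List.flatMap_cons, pv_pvG_append l x v]
        simp [hne]
    · -- x.2 = v : x goes to the end of the v-bucket
      have hmem : x.2 ∈ v :: ks := by simp [heq]
      simp only [hmem, if_true]
      have hfalse : ∀ y ∈ pvG l v, (fun a b => decide ((b : String × Int).2 < a.2)) x y = false := by
        intro y hy
        have := pv_mem_pvG hy
        simp [this, heq]
      rw [List.flatMap_cons, pv_insertBy_all_false_append _ _ _ _ hfalse]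
      have htrue : ∀ y ∈ ks.flatMap (pvG l), (fun a b => decide ((b : String × Int).2 < a.2)) x y = true := by
        intro y hy
        rcases List.mem_flatMap.mp hy with ⟨w, hw, hyw⟩
        have h1 := pv_mem_pvG hyw
        have h2 := (List.pairwise_cons.mp hpw).1 w hw
        simp [h1, heq]
        omega
      rw [pv_insertBy_all_true _ _ _ htrue]
      have hrest : ks.flatMap (pvG (l ++ [x])) = ks.flatMap (pvG l) := by
        apply pv_flatMap_congr
        intro w hw
        have : w < v := (List.pairwise_cons.mp hpw).1 w hw
        rw [pv_pvG_append]
        simp [show x.2 ≠ w by omega]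
      rw [List.flatMap_cons, pv_pvG_append l x v, hrest]
      simp [heq]
    · -- v < x.2 : x goes in front of everything
      have hnotin : x.2 ∉ v :: ks := by
        simp only [List.mem_cons, not_or]
        constructor
        · omega
        · intro hx
          have := (List.pairwise_cons.mp hpw).1 _ hx
          omega
      have htrue : ∀ y ∈ (v :: ks).flatMap (pvG l), (fun a b => decide ((b : String × Int).2 < a.2)) x y = true := by
        intro y hy
        rcases List.mem_flatMap.mp hy with ⟨w, hw, hyw⟩
        have h1 := pv_mem_pvG hyw
        rcases List.mem_cons.mp hw with hw | hw
        · simp [h1, hw, hgt]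
        · have := (List.pairwise_cons.mp hpw).1 w hw
          simp [h1]
          omega
      rw [pv_insertBy_all_true _ _ _ htrue]
      have htk : (v :: ks).takeWhile (fun w => decide (x.2 < w)) = [] := by
        simp [not_lt_of_gt hgt]
      have hdk : (v :: ks).dropWhile (fun w => decide (x.2 < w)) = v :: ks := by
        simp [not_lt_of_gt hgt]
      simp only [hnotin, if_false, htk, hdk, List.nil_append, List.flatMap_cons]
      rw [pv_pvG_append]
      simp only [h2 hnotin, List.nil_append]
      have hrest : pvG (l ++ [x]) v ++ ks.flatMap (pvG (l ++ [x]))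
          = pvG l v ++ ks.flatMap (pvG l) := by
        rw [pv_pvG_append]
        have : x.2 ≠ v := by omega
        simp only [this, if_false, List.append_nil]
        congr 1
        apply pv_flatMap_congr
        intro w hw
        have := (List.pairwise_cons.mp hpw).1 w hw
        rw [pv_pvG_append]
        simp [show x.2 ≠ w by omega]
      rw [hrest]
      simp

lemma pv_dropWhile_le {k : Int} :
    ∀ (ks : List Int), ks.Pairwise (· > ·) →
      ∀ v ∈ ks.dropWhile (fun w => decide (k < w)), v ≤ k := by
  intro ks
  induction ks with
  | nil => simp
  | cons a t ih =>
    intro hpw v hv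
    by_cases ha : k < a
    · rw [List.dropWhile_cons_of_pos (by simpa using ha)] at hv
      exact ih hpw.of_cons v hv
    · rw [List.dropWhile_cons_of_neg (by simpa using ha)] at hv
      rcases List.mem_cons.mp hv with rfl | hv
      · omega
      · have := (List.pairwise_cons.mp hpw).1 v hv
        omega

lemma pv_ks_pairwise (S : List Int) (hn : S.Nodup) :
    (PySem.List.sorted S (fun v => v) true).Pairwise (· > ·) := by
  have h1 := PySem.List.sorted_pairwise_rev S (fun v => v)
  have h2 : (PySem.List.sorted S (fun v => v) true).Nodup :=
    (PySem.List.sorted_perm S (fun v => v) true).nodup_iff.mpr hn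
  have := List.Pairwise.and h1 h2
  exact this.imp (fun {a b} h => lt_of_le_of_ne h.1 (Ne.symm h.2))

-- the stable reverse sort by count is exactly the descending-frequency bucket walk
lemma pv_sort_groups (l : List (String × Int)) :
    PySem.List.sorted l (fun p => p.2) true
      = (PySem.List.sorted (PySem.Set.ofList (l.map (fun p => p.2))) (fun v => v) true).flatMap (pvG l) := by
  induction l using List.reverseRecOn with
  | nil => rfl
  | append_singleton t x ih =>
    rw [PySem.List.sorted_rev_eq_foldl_insertBy, List.foldl_append, List.foldl_cons,
        List.foldl_nil, ← PySem.List.sorted_rev_eq_foldl_insertBy, ih]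
    have hS : (PySem.Set.ofList (t.map (fun p => p.2))).Nodup :=
      PySem.Set.nodup_ofList _
    have hpw := pv_ks_pairwise _ hS
    have hmemks : ∀ v : Int, v ∈ PySem.List.sorted (PySem.Set.ofList (t.map (fun p => p.2))) (fun v => v) true ↔ v ∈ t.map (fun p => p.2) := by
      intro v
      rw [(PySem.List.sorted_perm _ _ _).mem_iff, PySem.Set.mem_ofList]
    have h2 : x.2 ∉ PySem.List.sorted (PySem.Set.ofList (t.map (fun p => p.2))) (fun v => v) true → pvG t x.2 = [] := by
      intro hn
      rw [hmemks] at hn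
      rw [pvG, List.filter_eq_nil_iff]
      intro p hp
      simp only [beq_iff_eq]
      intro hpv
      exact hn (by simpa [← hpv] using List.mem_map_of_mem (f := fun p => p.2) hp)
    rw [pv_insert_group x t _ hpw h2]
    have hmap : (t ++ [x]).map (fun p => p.2) = t.map (fun p => p.2) ++ [x.2] := by simp
    by_cases hx : x.2 ∈ PySem.List.sorted (PySem.Set.ofList (t.map (fun p => p.2))) (fun v => v) true
    · rw [if_pos hx]
      have : PySem.Set.ofList ((t ++ [x]).map (fun p => p.2)) = PySem.Set.ofList (t.map (fun p => p.2)) := by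
        rw [hmap, PySem.Set.ofList_append_singleton,
            PySem.Set.add_of_mem (PySem.Set.mem_ofList _ _ |>.mpr ((hmemks _).mp hx))]
      rw [this]
    · rw [if_neg hx]
      have hxS : x.2 ∉ PySem.Set.ofList (t.map (fun p => p.2)) := by
        rw [PySem.Set.mem_ofList]
        exact fun h => hx ((hmemks _).mpr h)
      have hadd : PySem.Set.ofList ((t ++ [x]).map (fun p => p.2))
          = PySem.Set.ofList (t.map (fun p => p.2)) ++ [x.2] := by
        rw [hmap, PySem.Set.ofList_append_singleton, PySem.Set.add_of_not_mem hxS]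
      rw [hadd]
      set ks := PySem.List.sorted (PySem.Set.ofList (t.map (fun p => p.2))) (fun v => v) true with hks
      have hsplit : ks.takeWhile (fun v => decide (x.2 < v)) ++ ks.dropWhile (fun v => decide (x.2 < v)) = ks :=
        List.takeWhile_append_dropWhile
      have hsorted : PySem.List.sorted (PySem.Set.ofList (t.map (fun p => p.2)) ++ [x.2]) (fun v => v) true
          = ks.takeWhile (fun v => decide (x.2 < v)) ++ x.2 :: ks.dropWhile (fun v => decide (x.2 < v)) := by
        apply PySem.List.sorted_rev_eq_of_perm_of_pairwise_gt
        · have p1 : (ks.takeWhile (fun v => decide (x.2 < v)) ++ x.2 :: ks.dropWhile (fun v => decide (x.2 < v))).Perm (x.2 :: ks) := by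
            have h := List.perm_middle (a := x.2)
              (l₁ := ks.takeWhile (fun v => decide (x.2 < v)))
              (l₂ := ks.dropWhile (fun v => decide (x.2 < v)))
            rwa [hsplit] at h
          have p2 : (x.2 :: ks).Perm (x.2 :: PySem.Set.ofList (t.map (fun p => p.2))) :=
            (PySem.List.sorted_perm _ _ _).cons x.2
          have p3 : (x.2 :: PySem.Set.ofList (t.map (fun p => p.2))).Perm
              (PySem.Set.ofList (t.map (fun p => p.2)) ++ [x.2]) :=
            (List.perm_append_singleton _ _).symm
          exact p1.trans (p2.trans p3)
        · rw [List.pairwise_append]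
          refine ⟨hpw.sublist (List.takeWhile_sublist _), ?_, ?_⟩
          · rw [List.pairwise_cons]
            refine ⟨?_, hpw.sublist (List.dropWhile_sublist _)⟩
            intro b hb
            have hble := pv_dropWhile_le ks hpw b hb
            have hbne : b ≠ x.2 := by
              intro h
              exact hx (h ▸ (List.dropWhile_sublist _).mem hb)
            simp only [gt_iff_lt]
            omega
          · intro a ha b hb
            have hagt : x.2 < a := by
              have := List.mem_takeWhile_imp ha
              simpa using this
            rcases List.mem_cons.mp hb with rfl | hb
            · exact hagt
            · have hble := pv_dropWhile_le ks hpw b hb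
              simp only [gt_iff_lt]
              omega
      rw [hsorted]

-- second components of an enumeration
lemma pv_enum_snd {α : Type} : ∀ (xs : List α) (n : Int),
    (PySem.List.enumerate xs n).map (fun ip => ip.2) = xs := by
  intro xs
  induction xs with
  | nil => intro n; simp [PySem.List.enumerate_nil]
  | cons a t ih => intro n; simp [PySem.List.enumerate_cons, ih]

lemma pv_enum_map {α β : Type} (f : α → β) : ∀ (xs : List α) (n : Int),
    PySem.List.enumerate (xs.map f) n
      = (PySem.List.enumerate xs n).map (fun ip => (ip.1, f ip.2)) := by
  intro xs
  induction xs with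
  | nil => intro n; simp [PySem.List.enumerate_nil]
  | cons a t ih => intro n; simp [PySem.List.enumerate_cons, ih]

-- the rank-assigning pair loop is an enumeration loop
lemma pv_rank_fold : ∀ (cs : List String) (d : PySem.Dict String Int) (n : Int),
    cs.foldl (fun (acc2 : PySem.Dict String Int × Int) ch =>
        (acc2.1.insert ch (acc2.2 + 1), acc2.2 + 1)) (d, n)
      = ((PySem.List.enumerate cs n).foldl (fun d ip => d.insert ip.2 (ip.1 + 1)) d,
         n + cs.length) := by
  intro cs
  induction cs with
  | nil => intro d n; simp [PySem.List.enumerate_nil]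
  | cons a t ih =>
    intro d n
    simp only [List.foldl_cons, PySem.List.enumerate_cons, ih, Prod.mk.injEq, List.length_cons]
    refine ⟨trivial, by push_cast; ring⟩

-- A's output, closed form
lemma pv_items_empty : (PySem.Dict.empty : PySem.Dict String Int).items = [] := by
  simp [PySem.Dict.empty]

lemma pv_A_closed (texts : List String) :
    map_char_to_int texts
      = (PySem.List.enumerate
          (PySem.List.sorted (PySem.Dict.counter (pvChars texts)).items (fun row => row.2) true) 0).map
          (fun ip => (ip.2.1, ip.1 + 1)) := by
  rw [map_char_to_int]
  simp only [pv_nested_count]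
  set s := PySem.List.sorted (PySem.Dict.counter (pvChars texts)).items (fun row => row.2) true with hs
  have hnodup : ((PySem.List.enumerate s 0).map (fun ip => ip.2.1)).Nodup := by
    have hmap : (PySem.List.enumerate s 0).map (fun ip => ip.2.1)
        = s.map (fun p => p.1) := by
      rw [show (fun (ip : Int × (String × Int)) => ip.2.1)
            = (fun p : String × Int => p.1) ∘ (fun ip : Int × (String × Int) => ip.2) from rfl,
          ← List.map_map, pv_enum_snd]
    rw [hmap]
    have hperm : (s.map (fun p => p.1)).Perm
        ((PySem.Dict.counter (pvChars texts)).items.map (fun p => p.1)) :=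
      (PySem.List.sorted_perm _ _ _).map _
    exact hperm.nodup_iff.mpr (PySem.Dict.nodup_keys_counter (pvChars texts))
  have := PySem.Dict.items_foldl_insert_fresh (PySem.List.enumerate s 0)
    (fun ip => ip.2.1) (fun ip => ip.1 + 1) PySem.Dict.empty
    (by intro a _; simp [PySem.Dict.empty, PySem.Dict.contains_mk]) hnodup
  simpa [pv_items_empty] using this

-- B's bucket dict, characterised
lemma pv_buckets_getD (l : List (String × Int)) (v : Int) :
    (l.foldl (fun d p => d.modify p.2 [] (fun cur => cur ++ [p.1])) PySem.Dict.empty).getD v []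
      = (pvG l v).map (fun p => p.1) := by
  have hfold : l.foldl (fun d p => d.modify p.2 [] (fun cur => cur ++ [p.1])) PySem.Dict.empty
      = (l.map (fun p => (p.2, p.1))).foldl
          (fun d q => d.modify q.1 [] (fun cur => cur ++ [q.2])) PySem.Dict.empty := by
    rw [List.foldl_map]
  rw [hfold, PySem.Dict.getD_foldl_modify_append]
  have : PySem.Dict.empty.getD v ([] : List String) = [] := by
    simp [PySem.Dict.getD, PySem.Dict.get?_empty]
  rw [this, List.nil_append, List.filter_map]
  rw [List.map_map, pvG]
  rfl

lemma pv_buckets_keys (l : List (String × Int)) :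
    (l.foldl (fun d p => d.modify p.2 [] (fun cur => cur ++ [p.1])) PySem.Dict.empty).keys
      = PySem.Set.ofList (l.map (fun p => p.2)) := by
  have := PySem.Dict.keys_foldl_modify_key l (fun p => p.2) ([] : List String)
    (fun _ p => fun cur => cur ++ [p.1]) PySem.Dict.empty
  rw [this, PySem.Dict.keys_empty, PySem.Set.update_nil_left]

-- B's output, closed form
lemma pv_B_closed (texts : List String) :
    map_char_to_int_alt texts
      = (PySem.List.enumerate
          ((PySem.List.sorted (PySem.Dict.counter (pvChars texts)).items (fun row => row.2) true).map (fun p => p.1)) 0).map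
          (fun ip => (ip.2, ip.1 + 1)) := by
  rw [map_char_to_int_alt]
  simp only [pv_nested_count]
  set l := (PySem.Dict.counter (pvChars texts)).items with hl
  set s := PySem.List.sorted l (fun row => row.2) true with hs
  set ks := PySem.List.sorted (PySem.Set.ofList (l.map (fun p => p.2))) (fun v => v) true with hks
  have hkeys : (l.foldl (fun d p => d.modify p.2 [] (fun cur => cur ++ [p.1])) PySem.Dict.empty).keys
      = PySem.Set.ofList (l.map (fun p => p.2)) := pv_buckets_keys l
  rw [hkeys]
  -- the nested rank loop is a loop over the flattened bucket list
  rw [show (fun (acc : PySem.Dict String Int × Int) v =>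
        ((l.foldl (fun d p => d.modify p.2 [] (fun cur => cur ++ [p.1])) PySem.Dict.empty).getD v []).foldl
          (fun (acc2 : PySem.Dict String Int × Int) ch =>
            (acc2.1.insert ch (acc2.2 + 1), acc2.2 + 1)) acc)
      = (fun (acc : PySem.Dict String Int × Int) v =>
        ((pvG l v).map (fun p => p.1)).foldl
          (fun (acc2 : PySem.Dict String Int × Int) ch =>
            (acc2.1.insert ch (acc2.2 + 1), acc2.2 + 1)) acc) from by
    funext acc v
    rw [pv_buckets_getD]]
  rw [← pv_foldl_flatMap (fun v => (pvG l v).map (fun p => p.1))]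
  have hflat : ks.flatMap (fun v => (pvG l v).map (fun p => p.1))
      = s.map (fun p => p.1) := by
    rw [← List.map_flatMap, hs, pv_sort_groups l, hks]
  rw [hflat, pv_rank_fold]
  have hnodup : ((PySem.List.enumerate (s.map (fun p => p.1)) 0).map (fun ip => ip.2)).Nodup := by
    rw [pv_enum_snd]
    have hperm : (s.map (fun p => p.1)).Perm (l.map (fun p => p.1)) :=
      (PySem.List.sorted_perm _ _ _).map _
    exact hperm.nodup_iff.mpr (PySem.Dict.nodup_keys_counter (pvChars texts))
  have := PySem.Dict.items_foldl_insert_fresh (PySem.List.enumerate (s.map (fun p => p.1)) 0)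
    (fun ip => ip.2) (fun ip => ip.1 + 1) PySem.Dict.empty
    (by intro a _; simp [PySem.Dict.empty, PySem.Dict.contains_mk]) hnodup
  simpa [pv_items_empty] using this

-- ===== VERDICT (by name: the statement is the Claim_ definition above) =====
theorem map_char_to_int_spec : Claim_equal_map_char_to_int := by
  intro texts _
  unfold Spec_map_char_to_int
  rw [pv_A_closed, pv_B_closed, pv_enum_map, List.map_map]
  rfl
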